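-- pv_equiv track=rewrite | github.com/agileguy/canadian-data-observatory | services/exporter/app/collectors/government.py | _find_datastore_resource
-- ===== SOURCE A (Python) =====
-- from typing import Any, Dict, List, Optional
--
-- def _find_datastore_resource(resources: List[dict]) -> Optional[str]:
--     """Find the first datastore-active resource in a CKAN dataset.
--
--     Falls back to the first CSV/XLS resource if no datastore-active resource.
--     """
--     for r in resources:
--         if r.get("datastore_active"):
--             return r["id"]
--     # Fallback: first CSV resource (may need direct download instead of datastore_search)
--     for r in resources:
--         fmt = (r.get("format") or "").upper()
--         if fmt in ("CSV", "XLS", "XLSX"):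
--             return r["id"]
--     return None
-- ===== SOURCE B (Python) =====
-- def _find_datastore_resource(resources):
--     """Single pass: return first datastore-active id; remember the first
--     CSV/XLS/XLSX resource as fallback and return its id after the scan."""
--     fallback = None
--     for r in resources:
--         if r.get("datastore_active"):
--             return r["id"]
--         if fallback is None and (r.get("format") or "").upper() in ("CSV", "XLS", "XLSX"):
--             fallback = r
--     return fallback["id"] if fallback is not None else None
-- ===== Notes on version B (the rewrite author's own statement) =====
-- stated objective: alternative
-- what changed: Replaces A's two sequential scans with one fused pass that returns on the first datastore-active resource and carries the first CSV/XLS/XLSX resource as a fallback returned after the scan.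
import Mathlib
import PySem

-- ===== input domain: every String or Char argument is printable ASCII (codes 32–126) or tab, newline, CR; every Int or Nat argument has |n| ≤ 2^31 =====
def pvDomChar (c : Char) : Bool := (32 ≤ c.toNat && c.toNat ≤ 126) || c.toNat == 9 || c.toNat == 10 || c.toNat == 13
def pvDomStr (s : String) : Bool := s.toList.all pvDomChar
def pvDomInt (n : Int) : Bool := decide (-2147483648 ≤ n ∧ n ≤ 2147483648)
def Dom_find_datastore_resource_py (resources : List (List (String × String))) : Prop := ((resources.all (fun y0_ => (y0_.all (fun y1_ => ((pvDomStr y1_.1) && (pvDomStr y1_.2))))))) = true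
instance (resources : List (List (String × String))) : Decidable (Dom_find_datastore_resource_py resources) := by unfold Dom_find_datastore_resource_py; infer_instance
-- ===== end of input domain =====

-- B fuses A's two sequential scans into a single pass carrying the first CSV/XLS/XLSX
-- resource as a fallback (alternative decomposition; same cost).
-- Both Pythons raise KeyError on the same inputs (a selected resource missing "id");
-- those inputs are excluded by Pre_.

-- ===== PORT A =====
-- dict lookup on the association list (first match = Python dict semantics under the type convention)
def pvGet (r : List (String × String)) (k : String) : Option String :=
  (r.find? (fun p => p.1 == k)).map (·.2)

-- truthiness of r.get("datastore_active"): present with a non-empty string value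
def pvActive (r : List (String × String)) : Bool :=
  ((pvGet r "datastore_active").getD "") != ""

-- fmt = (r.get("format") or "").upper(); fmt in ("CSV", "XLS", "XLSX")
def pvFmtOk (r : List (String × String)) : Bool :=
  let fmt := PySem.Str.upper ((pvGet r "format").getD "")
  fmt == "CSV" || fmt == "XLS" || fmt == "XLSX"

-- first loop of A: returns `some v` when it executes `return r["id"]` (v = none ~ KeyError, excluded by Pre_)
def pvALoop1 : List (List (String × String)) → Option (Option String)
  | [] => none
  | r :: t => if pvActive r then some (pvGet r "id") else pvALoop1 t

-- second loop of A (the CSV/XLS fallback scan)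
def pvALoop2 : List (List (String × String)) → Option (Option String)
  | [] => none
  | r :: t => if pvFmtOk r then some (pvGet r "id") else pvALoop2 t

def find_datastore_resource_py (resources : List (List (String × String))) : Option String :=
  match pvALoop1 resources with
  | some v => v
  | none =>
    match pvALoop2 resources with
    | some v => v
    | none => none

-- ===== PORT B =====
-- single pass with a fallback accumulator holding the first CSV/XLS/XLSX resource
def pvBLoop : List (List (String × String)) → Option (List (String × String)) → Option String
  | [], fb =>
    match fb with
    | some r => pvGet r "id"
    | none => none
  | r :: t, fb =>
    if pvActive r then pvGet r "id"
    else pvBLoop t (if fb.isNone && pvFmtOk r then some r else fb)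

def find_datastore_resource_py_alt (resources : List (List (String × String))) : Option String :=
  pvBLoop resources none

-- ===== PRECONDITION & SPEC =====
-- Pre_ excludes exactly the inputs where Python A raises KeyError: the resource it
-- selects (first datastore-active one, else first CSV/XLS/XLSX one) has no "id" key.
def pvPreB (resources : List (List (String × String))) : Bool :=
  match resources.find? pvActive with
  | some r => (pvGet r "id").isSome
  | none =>
    match resources.find? pvFmtOk with
    | some r => (pvGet r "id").isSome
    | none => true

def Pre_find_datastore_resource_py (resources : List (List (String × String))) : Prop :=
  pvPreB resources = true
instance (resources : List (List (String × String))) : Decidable (Pre_find_datastore_resource_py resources) := by unfold Pre_find_datastore_resource_py; infer_instance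

def pvWitness_find_datastore_resource_py : (List (List (String × String))) :=
  [[("id", "a"), ("format", "json")], [("id", "b"), ("format", "csv")], [("id", "c"), ("datastore_active", "true")]]

def Spec_find_datastore_resource_py (resources : List (List (String × String))) (out : Option String) : Prop := out = find_datastore_resource_py_alt resources
instance (resources : List (List (String × String))) (out : Option String) : Decidable (Spec_find_datastore_resource_py resources out) := by unfold Spec_find_datastore_resource_py; infer_instance

-- ===== CLAIM (what is proved, stated in full; the proofs are below) =====
def Claim_equal_find_datastore_resource_py : Prop := ∀ (resources : List (List (String × String))), Dom_find_datastore_resource_py resources → Pre_find_datastore_resource_py resources → Spec_find_datastore_resource_py resources (find_datastore_resource_py resources)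

-- ===== LEMMAS AND PROOFS =====

-- B's loop equals A's two-scan result, for any fallback state (no precondition needed:
-- the ports agree even on the KeyError inputs, where both select the same resource).
theorem pvBLoop_eq (t : List (List (String × String))) :
    ∀ fb, pvBLoop t fb =
      match pvALoop1 t with
      | some v => v
      | none =>
        match fb with
        | some r => pvGet r "id"
        | none =>
          match pvALoop2 t with
          | some v => v
          | none => none := by
  induction t with
  | nil => intro fb; simp [pvBLoop, pvALoop1, pvALoop2]
  | cons r t ih =>
    intro fb
    by_cases ha : pvActive r
    · simp [pvBLoop, pvALoop1, ha]
    · simp only [pvBLoop, pvALoop1, pvALoop2, ha, if_neg, Bool.false_eq_true,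
        not_false_eq_true]
      rw [ih]
      cases h1 : pvALoop1 t with
      | some v => simp
      | none =>
        cases fb with
        | some r' => simp
        | none =>
          by_cases hf : pvFmtOk r
          · simp [hf]
          · simp [hf]

-- ===== VERDICT (by name: the statement is the Claim_ definition above) =====
theorem find_datastore_resource_py_spec : Claim_equal_find_datastore_resource_py := by
  intro resources _ _
  unfold Spec_find_datastore_resource_py find_datastore_resource_py find_datastore_resource_py_alt
  rw [pvBLoop_eq]
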